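-- pv_equiv track=rewrite | github.com/atviriduomenys/spinta | spinta/manifests/tabular/helpers.py | _join_escapes
-- ===== SOURCE A (Python) =====
-- from typing import List
--
-- def _join_escapes(row: List[str]) -> List[str]:
--     res = []
--     for v in row:
--         if res and res[-1] and res[-1].endswith('\\'):
--             res[-1] = res[-1][:-1] + '|' + v
--         else:
--             res.append(v)
--     return res
-- ===== SOURCE B (Python) =====
-- from typing import List
--
-- def _join_escapes(row: List[str]) -> List[str]:
--     out = []
--     i = 0
--     n = len(row)
--     while i < n:
--         parts = [row[i]]
--         i += 1
--         while parts[-1].endswith('\\') and i < n: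
--             parts[-1] = parts[-1][:-1]
--             parts.append(row[i])
--             i += 1
--         out.append('|'.join(parts))
--     return out
-- ===== Notes on version B (the rewrite author's own statement) =====
-- stated objective: alternative
-- what changed: Replaces A's single pass that appends and destructively rewrites the last output cell with an index-driven outer/inner while-loop that first gathers the whole run of backslash-terminated cells into a parts list and then emits '|'.join(parts).
import Mathlib
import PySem

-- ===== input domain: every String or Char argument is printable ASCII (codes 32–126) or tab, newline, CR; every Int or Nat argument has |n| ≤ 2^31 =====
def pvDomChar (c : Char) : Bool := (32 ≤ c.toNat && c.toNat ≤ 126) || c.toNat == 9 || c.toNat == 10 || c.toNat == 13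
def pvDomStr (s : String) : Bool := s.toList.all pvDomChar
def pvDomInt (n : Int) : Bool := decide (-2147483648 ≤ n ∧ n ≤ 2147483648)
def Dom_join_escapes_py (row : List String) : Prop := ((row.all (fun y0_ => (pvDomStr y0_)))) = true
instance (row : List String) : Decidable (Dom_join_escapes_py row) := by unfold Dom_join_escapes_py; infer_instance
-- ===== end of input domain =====

-- B replaces A's append-and-mutate-last single pass by an index-driven gather-the-run-then-join
-- decomposition (objective: alternative decomposition, same cost).

-- ===== PORT A =====
-- one loop iteration of A: merge v into res[-1] when it is nonempty and ends with '\', else append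
def pvStepA (res : List String) (v : String) : List String :=
  match res.getLast? with
  | some last =>
      if last ≠ "" ∧ PySem.Str.endswith last "\\" then
        res.dropLast ++ [PySem.Str.slice last none (some (-1)) ++ "|" ++ v]
      else res ++ [v]
  | none => res ++ [v]

def join_escapes_py (row : List String) : List String :=
  row.foldl pvStepA []

-- ===== PORT B =====
-- inner while loop of B: collect the run of '\'-terminated pieces starting at the current cell;
-- returns ((first piece, later pieces), remaining cells)
def pvGather (p : String) (rest : List String) : (String × List String) × List String :=
  if PySem.Str.endswith p "\\" then
    match rest with
    | v :: rest' =>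
        let g := pvGather v rest'
        ((PySem.Str.slice p none (some (-1)), g.1.1 :: g.1.2), g.2)
    | [] => ((p, []), [])
  else ((p, []), rest)

theorem pvGather_rem_le (p : String) (rest : List String) :
    (pvGather p rest).2.length ≤ rest.length := by
  induction rest generalizing p with
  | nil => simp [pvGather]
  | cons v rest' ih =>
      simp only [pvGather]
      split
      · simpa using Nat.le_succ_of_le (ih v)
      · simp

def join_escapes_py_alt (row : List String) : List String :=
  match row with
  | [] => []
  | p :: rest =>
      let g := pvGather p rest
      PySem.Str.join "|" (g.1.1 :: g.1.2) :: join_escapes_py_alt g.2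
termination_by row.length
decreasing_by
  simpa using Nat.lt_succ_of_le (pvGather_rem_le p rest)

-- ===== PRECONDITION & SPEC =====
def Spec_join_escapes_py (row : List String) (out : List String) : Prop := out = join_escapes_py_alt row
instance (row : List String) (out : List String) : Decidable (Spec_join_escapes_py row out) := by unfold Spec_join_escapes_py; infer_instance

-- ===== CLAIM (what is proved, stated in full; the proofs are below) =====
def Claim_equal_join_escapes_py : Prop := ∀ (row : List String), Dom_join_escapes_py row → Spec_join_escapes_py row (join_escapes_py row)

-- ===== LEMMAS AND PROOFS =====
theorem pv_alt_nil : join_escapes_py_alt [] = [] := by unfold join_escapes_py_alt; rfl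

theorem pv_stepA_ne_nil (res : List String) (v : String) : pvStepA res v ≠ [] := by
  unfold pvStepA; split <;> [skip; simp]; split <;> simp

theorem pv_endswith_empty_false : PySem.Str.endswith "" "\\" = false := by decide

-- a one-char suffix is exactly the last element
theorem pv_singleton_suffix_iff (l : List Char) (c : Char) :
    [c] <:+ l ↔ l.getLast? = some c := by
  constructor
  · rintro ⟨t, rfl⟩; simp
  · intro h
    rcases l.eq_nil_or_concat with rfl | ⟨t, c', rfl⟩
    · simp at h
    · simp at h
      exact ⟨t, by simp [h]⟩

theorem pv_endswith_single (l : List Char) (c : Char) :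
    PySem.Chars.endswith l [c] = (l.getLast? == some c) := by
  rw [Bool.eq_iff_iff, PySem.Chars.endswith_iff, pv_singleton_suffix_iff, beq_iff_eq]

theorem pv_chars_endswith_glue (a v : List Char) :
    PySem.Chars.endswith (a ++ ['|'] ++ v) ['\\'] = PySem.Chars.endswith v ['\\'] := by
  rw [pv_endswith_single, pv_endswith_single, List.getLast?_append]
  cases v with
  | nil => simp
  | cons c t => simp [List.getLast?_cons]

theorem pv_endswith_glue (a v : String) :
    PySem.Str.endswith (a ++ "|" ++ v) "\\" = PySem.Str.endswith v "\\" := by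
  simp only [PySem.Str.endswith_eq, String.toList_append]
  exact pv_chars_endswith_glue a.toList v.toList

theorem pv_strip_glue (a v : String) (hv : v.toList ≠ []) :
    PySem.Str.slice (a ++ "|" ++ v) none (some (-1)) =
      a ++ "|" ++ PySem.Str.slice v none (some (-1)) := by
  apply String.toList_inj.mp
  simp only [PySem.Str.toList_slice, PySem.Chars.slice_eq_listSlice, String.toList_append,
    PySem.List.slice_to_neg_one, List.append_assoc]
  rw [List.dropLast_append_of_ne_nil (by simp), List.dropLast_append_of_ne_nil hv]

theorem pv_join_singleton (p : String) : PySem.Str.join "|" [p] = p := by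
  apply String.toList_inj.mp
  simp [PySem.Str.toList_join, PySem.Chars.join_singleton]

theorem pv_join_cons (x f : String) (ps : List String) :
    PySem.Str.join "|" (x :: f :: ps) = x ++ "|" ++ PySem.Str.join "|" (f :: ps) := by
  apply String.toList_inj.mp
  simp [PySem.Str.toList_join, PySem.Chars.join_cons_cons, String.toList_append]

theorem pv_join_glue (a f : String) (ps : List String) :
    PySem.Str.join "|" ((a ++ "|" ++ f) :: ps) = a ++ "|" ++ PySem.Str.join "|" (f :: ps) := by
  apply String.toList_inj.mp
  cases ps <;>
    simp [PySem.Str.toList_join, PySem.Chars.join_singleton, PySem.Chars.join_cons_cons,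
      String.toList_append]

-- pvGather's two unfoldings, by the head cell's trailing character
theorem pv_gather_false (p : String) (rest : List String)
    (h : PySem.Str.endswith p "\\" = false) : pvGather p rest = ((p, []), rest) := by
  conv_lhs => rw [pvGather.eq_def]
  rw [h]
  simp

theorem pv_gather_cons_true (p v : String) (rest : List String)
    (h : PySem.Str.endswith p "\\" = true) :
    pvGather p (v :: rest) =
      ((PySem.Str.slice p none (some (-1)), (pvGather v rest).1.1 :: (pvGather v rest).1.2),
        (pvGather v rest).2) := by
  conv_lhs => rw [pvGather.eq_def]
  rw [h]
  rfl

-- the merged cell gathers exactly like its tail cell, with the prefix glued onto the first piece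
theorem pv_gather_glue (a v : String) (rest : List String) :
    pvGather (a ++ "|" ++ v) rest =
      ((a ++ "|" ++ (pvGather v rest).1.1, (pvGather v rest).1.2), (pvGather v rest).2) := by
  cases hv : PySem.Str.endswith v "\\" with
  | false =>
      rw [pv_gather_false _ _ ((pv_endswith_glue a v).trans hv),
        pv_gather_false _ _ hv]
  | true =>
      have hvne : v.toList ≠ [] := by
        intro h
        have : v = "" := String.toList_eq_nil_iff.mp h
        rw [this, pv_endswith_empty_false] at hv; cases hv
      cases rest with
      | nil =>
          unfold pvGather
          rw [(pv_endswith_glue a v).trans hv, hv]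
          simp
      | cons w rest' =>
          rw [pv_gather_cons_true _ _ _ ((pv_endswith_glue a v).trans hv),
            pv_gather_cons_true _ _ _ hv, pv_strip_glue a v hvne]

-- A's loop never touches elements before the last one
theorem pv_foldA_frozen (row : List String) (acc res : List String) (h : res ≠ []) :
    List.foldl pvStepA (acc ++ res) row = acc ++ List.foldl pvStepA res row := by
  induction row generalizing res with
  | nil => simp
  | cons v row' ih =>
      have hstep : pvStepA (acc ++ res) v = acc ++ pvStepA res v := by
        rcases res.eq_nil_or_concat with rfl | ⟨t, last, rfl⟩
        · exact absurd rfl h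
        · unfold pvStepA
          simp only [List.concat_eq_append] at h ⊢
          rw [List.getLast?_append_of_ne_nil _ h, List.getLast?_concat]
          split <;> simp [List.dropLast_append_of_ne_nil h]
          split <;> rfl
      simp only [List.foldl_cons, hstep]
      exact ih (pvStepA res v) (pv_stepA_ne_nil res v)

-- main invariant: A's loop run from state [p] computes B's output on p :: row
theorem pv_main (n : Nat) : ∀ (row : List String) (p : String), row.length ≤ n →
    List.foldl pvStepA [p] row = join_escapes_py_alt (p :: row) := by
  induction n with
  | zero =>
      intro row p h
      rw [Nat.le_zero, List.length_eq_zero_iff] at h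
      subst h
      unfold join_escapes_py_alt pvGather
      cases hp : PySem.Str.endswith p "\\" <;> simp [pv_join_singleton, pv_alt_nil]
  | succ n ih =>
      intro row p h
      cases row with
      | nil =>
          unfold join_escapes_py_alt pvGather
          cases hp : PySem.Str.endswith p "\\" <;> simp [pv_join_singleton, pv_alt_nil]
      | cons v rest =>
          simp only [List.length_cons, Nat.succ_le_succ_iff] at h
          by_cases hp : p ≠ "" ∧ PySem.Str.endswith p "\\"
          · have hstep : pvStepA [p] v =
                [PySem.Str.slice p none (some (-1)) ++ "|" ++ v] := by
              unfold pvStepA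
              simp only [List.getLast?_singleton]
              rw [if_pos hp]
              simp
            rw [List.foldl_cons, hstep,
              ih rest (PySem.Str.slice p none (some (-1)) ++ "|" ++ v) h]
            conv_lhs => rw [join_escapes_py_alt]
            conv_rhs => rw [join_escapes_py_alt]
            rw [pv_gather_glue, pv_gather_cons_true p v rest hp.2, pv_join_glue, pv_join_cons]
          · have hpe : PySem.Str.endswith p "\\" = false := by
              rcases not_and_or.mp hp with hp1 | hp2
              · rw [not_ne_iff.mp hp1]; exact pv_endswith_empty_false
              · exact Bool.eq_false_iff.mpr hp2
            have hstep : pvStepA [p] v = [p] ++ [v] := by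
              unfold pvStepA
              simp only [List.getLast?_singleton]
              rw [if_neg hp]
            rw [List.foldl_cons, hstep,
              pv_foldA_frozen rest [p] [v] (by simp),
              ih rest v h]
            conv_rhs => rw [join_escapes_py_alt]
            rw [pv_gather_false p (v :: rest) hpe]
            simp [pv_join_singleton]

-- ===== VERDICT (by name: the statement is the Claim_ definition above) =====
theorem join_escapes_py_spec : Claim_equal_join_escapes_py := by
  intro row _
  unfold Spec_join_escapes_py join_escapes_py
  cases row with
  | nil => exact pv_alt_nil.symm
  | cons p rest =>
      have hstep : pvStepA [] p = [p] := by unfold pvStepA; rfl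
      rw [List.foldl_cons, hstep, pv_main rest.length rest p le_rfl]
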